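-- pv_equiv track=rewrite | github.com/benwu232/the-essence-of-computing | p11_8_subsum.py | subsum
-- ===== SOURCE A (Python) =====
-- def subsum(arr, n):
--     sum_dict = {}
--     sum = 0
--     cnt = 0
--     for k, e in enumerate(arr):
--         sum += e
--         if not sum_dict.get(sum):
--             sum_dict[sum] = [k, 1]
--         else:
--             sum_dict[sum] = [k, sum_dict[sum][1] + 1]
--
--     for sum in sum_dict:
--         if sum_dict.get(sum-n):
--             cnt += sum_dict[sum][1]
--     if sum_dict.get(n):
--         cnt += sum_dict[n][1]
--
--     return cnt
-- ===== SOURCE B (Python) =====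
-- def subsum(arr, n):
--     prefixes = []
--     s = 0
--     for e in arr:
--         s += e
--         prefixes.append(s)
--     srt = sorted(prefixes)
--     cnt = 0
--     j = 0
--     for i in range(len(srt)):
--         while j < len(srt) and srt[j] < srt[i] - n:
--             j += 1
--         if j < len(srt) and srt[j] == srt[i] - n:
--             cnt += 1
--     cnt += srt.count(n)
--     return cnt
-- ===== Notes on version B (the rewrite author's own statement) =====
-- stated objective: alternative
-- what changed: Replaces A's hash-based frequency dict and distinct-key scan with a comparison-based algorithm: sort the prefix sums once, then a two-pointer merge over the sorted list decides each membership p-n without any hashing, plus list.count for the p==n term.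
import Mathlib
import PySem

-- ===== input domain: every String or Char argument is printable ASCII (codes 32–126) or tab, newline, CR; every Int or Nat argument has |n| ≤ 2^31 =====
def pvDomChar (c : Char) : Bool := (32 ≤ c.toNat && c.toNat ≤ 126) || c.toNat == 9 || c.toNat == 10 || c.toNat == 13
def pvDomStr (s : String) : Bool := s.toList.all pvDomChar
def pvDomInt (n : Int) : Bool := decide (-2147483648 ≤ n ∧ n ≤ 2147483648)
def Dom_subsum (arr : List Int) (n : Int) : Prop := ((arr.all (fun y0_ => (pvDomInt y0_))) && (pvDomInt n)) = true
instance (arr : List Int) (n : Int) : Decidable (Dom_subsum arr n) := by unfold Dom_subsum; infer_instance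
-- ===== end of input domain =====

-- B replaces A's hash-based frequency dict and distinct-key scan by a comparison-based
-- algorithm: sort the prefix sums once, then a two-pointer merge over the sorted list.

-- ===== PORT A =====
-- `not sum_dict.get(sum)` is a missing-key test: stored values [k, c] are nonempty lists, always truthy.
def subsum (arr : List Int) (n : Int) : Int :=
  let st := (PySem.List.enumerate arr).foldl
    (fun (st : PySem.Dict Int (Int × Int) × Int) ke =>
      let sum := st.2 + ke.2
      let d := if (st.1.get? sum).isNone
               then st.1.insert sum (ke.1, 1)
               else st.1.insert sum (ke.1, (st.1.getD sum (0, 0)).2 + 1)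
      (d, sum))
    (PySem.Dict.empty, 0)
  let d := st.1
  let cnt := d.keys.foldl
    (fun cnt sum => if (d.get? (sum - n)).isSome then cnt + (d.getD sum (0, 0)).2 else cnt) 0
  if (d.get? n).isSome then cnt + (d.getD n (0, 0)).2 else cnt

-- ===== PORT B =====
-- inner `while j < len(srt) and srt[j] < srt[i] - n: j += 1`; the in-range index srt[j] is
-- ported as getD (exact: j < length there)
def pvAdvance (S : List Int) (t : Int) (j : Nat) : Nat :=
  if h : j < S.length ∧ S.getD j 0 < t then pvAdvance S t (j + 1) else j
termination_by S.length - j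
decreasing_by omega

def subsum_alt (arr : List Int) (n : Int) : Int :=
  let prefixes := (arr.foldl (fun (st : List Int × Int) e =>
      (st.1 ++ [st.2 + e], st.2 + e)) ([], 0)).1
  let srt := PySem.List.sorted prefixes (fun x => x) false
  let st := (List.range srt.length).foldl
    (fun (st : Int × Nat) i =>
      let j := pvAdvance srt (srt.getD i 0 - n) st.2
      (if j < srt.length ∧ srt.getD j 0 = srt.getD i 0 - n then st.1 + 1 else st.1, j))
    (0, 0)
  st.1 + (srt.count n : Int)

-- ===== PRECONDITION & SPEC =====
def Spec_subsum (arr : List Int) (n : Int) (out : Int) : Prop := out = subsum_alt arr n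
instance (arr : List Int) (n : Int) (out : Int) : Decidable (Spec_subsum arr n out) := by unfold Spec_subsum; infer_instance

-- ===== CLAIM (what is proved, stated in full; the proofs are below) =====
def Claim_equal_subsum : Prop := ∀ (arr : List Int) (n : Int), Dom_subsum arr n → Spec_subsum arr n (subsum arr n)

-- ===== LEMMAS AND PROOFS =====

-- prefix sums of arr starting from running total s0
def pvPfx (s0 : Int) : List Int → List Int
  | [] => []
  | e :: t => (s0 + e) :: pvPfx (s0 + e) t

theorem pvPfx_cons (s0 e : Int) (t : List Int) : pvPfx s0 (e :: t) = (s0 + e) :: pvPfx (s0 + e) t := rfl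

-- ---- B side ----
theorem b_prefix_fold (arr : List Int) :
    ∀ (pre : List Int) (s0 : Int),
    (arr.foldl (fun (st : List Int × Int) e => (st.1 ++ [st.2 + e], st.2 + e)) (pre, s0)).1
      = pre ++ pvPfx s0 arr := by
  induction arr with
  | nil => intro pre s0; simp [pvPfx]
  | cons e t ih =>
      intro pre s0
      simp only [List.foldl_cons, pvPfx_cons]
      rw [ih (pre ++ [s0 + e]) (s0 + e)]
      simp

theorem advance_spec (S : List Int) (t : Int) :
    ∀ j, j ≤ S.length → (∀ k < j, S.getD k 0 < t) →
    j ≤ pvAdvance S t j ∧ pvAdvance S t j ≤ S.length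
      ∧ (∀ k < pvAdvance S t j, S.getD k 0 < t)
      ∧ (pvAdvance S t j < S.length → ¬ S.getD (pvAdvance S t j) 0 < t) := by
  intro j
  induction j using pvAdvance.induct S t with
  | case1 j h ih =>
      intro hj hlt
      have hlt' : ∀ k < j + 1, S.getD k 0 < t := by
        intro k hk
        rcases Nat.lt_succ_iff_lt_or_eq.mp hk with h' | h'
        · exact hlt k h'
        · subst h'; exact h.2
      have hrec := ih h.1 hlt'
      rw [pvAdvance, dif_pos h]
      exact ⟨Nat.le_trans (Nat.le_succ j) hrec.1, hrec.2.1, hrec.2.2.1, hrec.2.2.2⟩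
  | case2 j h =>
      intro hj hlt
      rw [pvAdvance, dif_neg h]
      refine ⟨Nat.le_refl j, hj, hlt, ?_⟩
      intro hlen hcon
      exact h ⟨hlen, hcon⟩

-- on a sorted list, the two-pointer test decides membership of t
theorem test_iff_mem (S : List Int) (hs : S.Pairwise (· ≤ ·)) (t : Int) (j : Nat)
    (_hle : j ≤ S.length) (hbelow : ∀ k < j, S.getD k 0 < t)
    (hstop : j < S.length → ¬ S.getD j 0 < t) :
    ((j < S.length ∧ S.getD j 0 = t) ↔ t ∈ S) := by
  constructor
  · rintro ⟨hj, he⟩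
    rw [← he, List.getD_eq_getElem S 0 hj]
    exact List.getElem_mem hj
  · intro hm
    obtain ⟨m, hmlt, hme⟩ := List.mem_iff_getElem.mp hm
    have hjm : j ≤ m := by
      by_contra hc
      have := hbelow m (Nat.lt_of_not_le hc)
      rw [List.getD_eq_getElem S 0 hmlt, hme] at this
      omega
    have hjL : j < S.length := Nat.lt_of_le_of_lt hjm hmlt
    refine ⟨hjL, ?_⟩
    have hmono : S[j] ≤ S[m] := by
      rcases Nat.lt_or_ge j m with h' | h'
      · exact (List.pairwise_iff_getElem.mp hs) j m hjL hmlt h'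
      · have : j = m := Nat.le_antisymm hjm h'
        subst this; exact le_refl _
    have hns := hstop hjL
    rw [List.getD_eq_getElem S 0 hjL] at hns ⊢
    omega

theorem b_fold (S : List Int) (hs : S.Pairwise (· ≤ ·)) (n : Int) :
    ∀ (idxs : List Nat) (cnt : Int) (j : Nat),
    (∀ i ∈ idxs, i < S.length) →
    (idxs.map (fun i => S.getD i 0)).Pairwise (· ≤ ·) →
    j ≤ S.length →
    (∀ k < j, ∀ i ∈ idxs, S.getD k 0 < S.getD i 0 - n) →
    (idxs.foldl (fun (st : Int × Nat) i =>
        let j := pvAdvance S (S.getD i 0 - n) st.2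
        (if j < S.length ∧ S.getD j 0 = S.getD i 0 - n then st.1 + 1 else st.1, j)) (cnt, j)).1
      = cnt + (idxs.map (fun i => if (S.getD i 0 - n) ∈ S then (1 : Int) else 0)).sum := by
  intro idxs
  induction idxs with
  | nil => intro cnt j _ _ _ _; simp
  | cons i0 tl ih =>
      intro cnt j hidx hpw hj hinv
      simp only [List.foldl_cons, List.map_cons, List.sum_cons]
      have hadv := advance_spec S (S.getD i0 0 - n) j hj
        (fun k hk => hinv k hk i0 (List.mem_cons_self))
      set j' := pvAdvance S (S.getD i0 0 - n) j with hj'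
      have htest := test_iff_mem S hs (S.getD i0 0 - n) j' hadv.2.1 hadv.2.2.1 hadv.2.2.2
      have hinv' : ∀ k < j', ∀ i ∈ tl, S.getD k 0 < S.getD i 0 - n := by
        intro k hk i hi
        have h1 := hadv.2.2.1 k hk
        have h2 : S.getD i0 0 ≤ S.getD i 0 := by
          have := (List.pairwise_cons.mp hpw).1
          exact this _ (List.mem_map.mpr ⟨i, hi, rfl⟩)
        omega
      rw [ih _ j' (fun i hi => hidx i (List.mem_cons_of_mem _ hi))
            (List.pairwise_cons.mp hpw).2 hadv.2.1 hinv']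
      by_cases hm : (S.getD i0 0 - n) ∈ S
      · rw [if_pos (htest.mpr hm), if_pos hm]; ring
      · rw [if_neg (fun hc => hm (htest.mp hc)), if_neg hm]; ring

theorem map_getD_range (S : List Int) :
    (List.range S.length).map (fun i => S.getD i 0) = S := by
  apply List.ext_getElem
  · simp
  · intro i h1 h2
    simp only [List.getElem_map, List.getElem_range]
    exact List.getD_eq_getElem S 0 h2

theorem b_whole (S : List Int) (hs : S.Pairwise (· ≤ ·)) (n : Int) :
    ((List.range S.length).foldl (fun (st : Int × Nat) i =>
        (if pvAdvance S (S.getD i 0 - n) st.2 < S.length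
              ∧ S.getD (pvAdvance S (S.getD i 0 - n) st.2) 0 = S.getD i 0 - n
          then st.1 + 1 else st.1, pvAdvance S (S.getD i 0 - n) st.2)) (0, 0)).1
      = (S.map (fun p => if (p - n) ∈ S then (1 : Int) else 0)).sum := by
  have hmap : (List.range S.length).map (fun i => S.getD i 0) = S := map_getD_range S
  have h := b_fold S hs n (List.range S.length) 0 0
      (fun i hi => List.mem_range.mp hi)
      (by rw [hmap]; exact hs)
      (Nat.zero_le _)
      (by intro k hk; omega)
  have hconv : List.map (fun i => if S.getD i 0 - n ∈ S then (1 : Int) else 0) (List.range S.length)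
      = List.map (fun p => if p - n ∈ S then (1 : Int) else 0) S := by
    apply List.ext_getElem
    · simp
    · intro i h1 h2
      simp only [List.length_map] at h2
      simp only [List.getElem_map, List.getElem_range]
      rw [List.getD_eq_getElem S 0 (by simpa using h2)]
  rw [hconv, zero_add] at h
  exact h

theorem B_char (arr : List Int) (n : Int) :
    subsum_alt arr n
      = ((PySem.List.sorted (pvPfx 0 arr) (fun x => x) false).map
            (fun p => if (p - n) ∈ PySem.List.sorted (pvPfx 0 arr) (fun x => x) false then (1 : Int) else 0)).sum
        + ((PySem.List.sorted (pvPfx 0 arr) (fun x => x) false).count n : Int) := by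
  have hs : (PySem.List.sorted (pvPfx 0 arr) (fun x => x) false).Pairwise (· ≤ ·) := by
    have := PySem.List.sorted_pairwise (xs := pvPfx 0 arr) (key := fun x => x)
    simpa using this
  unfold subsum_alt
  rw [b_prefix_fold arr [] 0]
  simp only [List.nil_append]
  exact congrArg
    (fun z => z + ((PySem.List.sorted (pvPfx 0 arr) (fun x => x) false).count n : Int))
    (b_whole (PySem.List.sorted (pvPfx 0 arr) (fun x => x) false) hs n)

-- ---- A side ----
-- invariant of A's dict-building loop
def pvInv (d : PySem.Dict Int (Int × Int)) (Q : List Int) : Prop :=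
  (∀ s : Int, (d.get? s).isSome ↔ s ∈ Q)
  ∧ (∀ s : Int, s ∈ Q → (d.getD s (0, 0)).2 = (Q.count s : Int))
  ∧ d.keys.Nodup

theorem foldl_if_add (g : Int → Int) (q : Int → Prop) [DecidablePred q] (L : List Int) :
    ∀ c0 : Int,
    L.foldl (fun c s => if q s then c + g s else c) c0
      = c0 + (L.map (fun s => if q s then g s else 0)).sum := by
  induction L with
  | nil => intro c0; simp
  | cons x t ih =>
      intro c0
      simp only [List.foldl_cons, List.map_cons, List.sum_cons]
      rw [ih]
      split_ifs <;> ring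

theorem inv_step (d : PySem.Dict Int (Int × Int)) (Q : List Int) (s1 k : Int)
    (h : pvInv d Q) :
    pvInv (if (d.get? s1).isNone then d.insert s1 (k, 1)
           else d.insert s1 (k, (d.getD s1 (0, 0)).2 + 1)) (Q ++ [s1]) := by
  obtain ⟨h1, h2, h3⟩ := h
  by_cases hs : (d.get? s1).isNone
  · have hnot : s1 ∉ Q := by
      intro hm
      have := (h1 s1).mpr hm
      simp [Option.isNone_iff_eq_none] at hs
      simp [hs] at this
    have hcontains : d.contains s1 = false := by
      rw [PySem.Dict.contains_eq_isSome_get?]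
      simp [Option.isNone_iff_eq_none] at hs
      simp [hs]
    refine ⟨?_, ?_, ?_⟩ <;> simp only [hs, if_pos]
    · intro s
      rw [PySem.Dict.get?_insert]
      by_cases he : s = s1 <;> simp [he, h1]
    · intro s hm
      rw [PySem.Dict.getD_insert]
      by_cases he : s = s1
      · subst he
        simp [List.count_append, List.count_eq_zero_of_not_mem hnot]
      · have hmQ : s ∈ Q := by
          rcases List.mem_append.mp hm with h' | h'
          · exact h'
          · simp at h'; exact absurd h' he
        simp [he, h2 s hmQ, List.count_append,
              List.count_eq_zero_of_not_mem (by simp; exact fun h' => he h' : s ∉ [s1])]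
    · rw [PySem.Dict.keys_insert_of_not_contains _ _ hcontains]
      refine List.nodup_append.mpr ⟨h3, List.nodup_singleton _, ?_⟩
      intro x hx b hb
      have hb' : b = s1 := by simpa using hb
      subst hb'
      intro hxe
      subst hxe
      have hsome : (d.get? x).isSome := by
        rw [← PySem.Dict.contains_eq_isSome_get?, PySem.Dict.contains_eq_decide_mem_keys]
        simp [hx]
      simp [Option.isNone_iff_eq_none] at hs
      simp [hs] at hsome
  · have hmem : s1 ∈ Q := (h1 s1).mp (by simpa [Option.isSome_iff_ne_none, Option.isNone_iff_eq_none] using hs)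
    have hcontains : d.contains s1 = true := by
      rw [PySem.Dict.contains_eq_isSome_get?]
      simpa [Option.isSome_iff_ne_none, Option.isNone_iff_eq_none] using hs
    refine ⟨?_, ?_, ?_⟩ <;> simp only [hs, if_neg, Bool.not_eq_true]
    · intro s
      rw [PySem.Dict.get?_insert]
      by_cases he : s = s1 <;> simp [he, h1, hmem]
    · intro s hm
      rw [PySem.Dict.getD_insert]
      by_cases he : s = s1
      · subst he
        simp [h2 s hmem, List.count_append]
      · have hmQ : s ∈ Q := by
          rcases List.mem_append.mp hm with h' | h'
          · exact h'
          · simp at h'; exact absurd h' he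
        simp [he, h2 s hmQ, List.count_append,
              List.count_eq_zero_of_not_mem (by simp; exact fun h' => he h' : s ∉ [s1])]
    · rw [PySem.Dict.keys_insert_of_contains _ _ hcontains]
      exact h3

theorem a_fold_inv (pairs : List (Int × Int)) :
    ∀ (d : PySem.Dict Int (Int × Int)) (s0 : Int) (Q : List Int), pvInv d Q →
    pvInv ((pairs.foldl
      (fun (st : PySem.Dict Int (Int × Int) × Int) ke =>
        let sum := st.2 + ke.2
        let d := if (st.1.get? sum).isNone
                 then st.1.insert sum (ke.1, 1)
                 else st.1.insert sum (ke.1, (st.1.getD sum (0, 0)).2 + 1)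
        (d, sum)) (d, s0)).1)
      (Q ++ pvPfx s0 (pairs.map (·.2))) := by
  induction pairs with
  | nil => intro d s0 Q h; simpa [pvPfx] using h
  | cons ke t ih =>
      intro d s0 Q h
      simp only [List.foldl_cons, List.map_cons, pvPfx_cons]
      have step := inv_step d Q (s0 + ke.2) ke.1 h
      have := ih (if (d.get? (s0 + ke.2)).isNone then d.insert (s0 + ke.2) (ke.1, 1)
                  else d.insert (s0 + ke.2) (ke.1, (d.getD (s0 + ke.2) (0, 0)).2 + 1))
                 (s0 + ke.2) (Q ++ [s0 + ke.2]) step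
      simpa [List.append_assoc] using this

-- Σ over nodup key list D (same membership as P) of indicator·count = Σ over P of indicator
theorem group_sum (D P : List Int) (hnd : D.Nodup) (hmem : ∀ s, s ∈ D ↔ s ∈ P)
    (f : Int → Int) :
    (D.map (fun s => f s * (P.count s : Int))).sum = (P.map f).sum := by
  have h1 : D.toFinset = P.toFinset := by
    ext x; simp [List.mem_toFinset, hmem]
  rw [Finset.sum_list_map_count P f]
  rw [← h1]
  rw [← List.sum_toFinset _ hnd]
  apply Finset.sum_congr rfl
  intro x _
  simp [mul_comm]

theorem A_char (arr : List Int) (n : Int) :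
    subsum arr n
      = ((pvPfx 0 arr).map (fun p =>
            (if (p - n) ∈ pvPfx 0 arr then (1 : Int) else 0))).sum
        + (if n ∈ pvPfx 0 arr then ((pvPfx 0 arr).count n : Int) else 0) := by
  have base : pvInv PySem.Dict.empty [] := by
    refine ⟨?_, ?_, ?_⟩ <;> simp [PySem.Dict.get?_empty, PySem.Dict.keys_empty]
  have hinv := a_fold_inv (PySem.List.enumerate arr) PySem.Dict.empty 0 [] base
  rw [PySem.List.map_snd_enumerate] at hinv
  simp only [List.nil_append] at hinv
  unfold subsum
  simp only []
  set P := pvPfx 0 arr with hP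
  set d := ((PySem.List.enumerate arr).foldl
      (fun (st : PySem.Dict Int (Int × Int) × Int) ke =>
        let sum := st.2 + ke.2
        let d := if (st.1.get? sum).isNone
                 then st.1.insert sum (ke.1, 1)
                 else st.1.insert sum (ke.1, (st.1.getD sum (0, 0)).2 + 1)
        (d, sum)) (PySem.Dict.empty, 0)).1 with hd
  obtain ⟨h1, h2, h3⟩ := hinv
  have hkeysP : ∀ s, s ∈ d.keys ↔ s ∈ P := by
    intro s
    rw [← h1 s, ← PySem.Dict.contains_eq_isSome_get?, PySem.Dict.contains_eq_decide_mem_keys]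
    simp
  rw [foldl_if_add (fun s => (d.getD s (0, 0)).2) (fun s => (d.get? (s - n)).isSome) d.keys 0]
  have hmapeq : d.keys.map (fun s => if (d.get? (s - n)).isSome then (d.getD s (0, 0)).2 else 0)
      = d.keys.map (fun s => (if (s - n) ∈ P then (1 : Int) else 0) * (P.count s : Int)) := by
    refine List.map_congr_left ?_
    intro s hs
    simp only [h1, h2 s ((hkeysP s).mp hs)]
    split_ifs <;> simp
  rw [hmapeq, group_sum d.keys P h3 hkeysP]
  by_cases hn : n ∈ P
  · rw [if_pos ((h1 n).mpr hn), if_pos hn, h2 n hn]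
    simp
  · rw [if_neg (by rw [h1 n]; exact hn), if_neg hn]
    simp

-- ===== VERDICT (by name: the statement is the Claim_ definition above) =====
theorem subsum_spec : Claim_equal_subsum := by
  intro arr n _
  unfold Spec_subsum
  rw [A_char, B_char]
  set P := pvPfx 0 arr with hP
  set S := PySem.List.sorted P (fun x => x) false with hS
  have hperm : S.Perm P := PySem.List.sorted_perm P (fun x => x) false
  have hmapeq : S.map (fun p => if (p - n) ∈ S then (1 : Int) else 0)
      = S.map (fun p => if (p - n) ∈ P then (1 : Int) else 0) := by
    refine List.map_congr_left ?_
    intro p _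
    by_cases hm : (p - n) ∈ P
    · rw [if_pos (hperm.mem_iff.mpr hm), if_pos hm]
    · rw [if_neg (fun hc => hm (hperm.mem_iff.mp hc)), if_neg hm]
  have hsum : (S.map (fun p => if (p - n) ∈ P then (1 : Int) else 0)).sum
      = (P.map (fun p => if (p - n) ∈ P then (1 : Int) else 0)).sum :=
    (hperm.map _).sum_eq
  have hcnt : (S.count n : Int) = (if n ∈ P then ((P.count n : Int)) else 0) := by
    rw [hperm.count_eq]
    by_cases hn : n ∈ P
    · rw [if_pos hn]
    · rw [if_neg hn, List.count_eq_zero_of_not_mem hn]; rfl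
  rw [hmapeq, hsum, hcnt]
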